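-- pv_equiv track=rewrite | github.com/brusha28/AI-Game | Piece Generator.py | merge_single_pieces
-- ===== SOURCE A (Python) =====
-- def merge_single_pieces(pieces):
--     merged_pieces = []
--     single_pieces = [piece for piece in pieces if len(piece) == 1]
--     other_pieces = [piece for piece in pieces if len(piece) > 1]
--
--     for single_piece in single_pieces:
--         single_coord = next(iter(single_piece))
--         merged = False
--         for piece in other_pieces:
--             for coord in piece:
--                 if (abs(coord[0] - single_coord[0]) == 1 and coord[1] == single_coord[1]) or \
--                    (abs(coord[1] - single_coord[1]) == 1 and coord[0] == single_coord[0]):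
--                     piece.add(single_coord)
--                     merged = True
--                     break
--             if merged:
--                 break
--         if not merged:
--             merged_pieces.append(single_piece)
--
--     return other_pieces + merged_pieces
-- ===== SOURCE B (Python) =====
-- def merge_single_pieces(pieces):
--     # Same return value as A; like A it mutates the multi-cell sets in place.
--     # Coordinate index: coord -> smallest index (in others) of a piece containing it.
--     singles = []
--     others = []
--     index = {}
--     for p in pieces:
--         if len(p) == 1:
--             singles.append(p)
--         elif len(p) > 1:
--             i = len(others)
--             others.append(p)
--             for c in p:
--                 if c not in index:
--                     index[c] = i
--     unmerged = []
--     for s in singles: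
--         (x, y) = next(iter(s))
--         cands = [index[nb] for nb in ((x - 1, y), (x + 1, y), (x, y - 1), (x, y + 1)) if nb in index]
--         if cands:
--             i = min(cands)
--             others[i].add((x, y))
--             if (x, y) not in index or index[(x, y)] > i:
--                 index[(x, y)] = i
--         else:
--             unmerged.append(s)
--     return others + unmerged
-- ===== Notes on version B (the rewrite author's own statement) =====
-- stated objective: alternative
-- what changed: Instead of rescanning every coordinate of every multi-cell piece for each single-cell piece, B builds a dict mapping each coordinate to the first piece containing it, resolves each single by looking up its 4 neighbours, and updates the dict incrementally; it trades A's repeated scans for one indexing pass.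
import Mathlib
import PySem

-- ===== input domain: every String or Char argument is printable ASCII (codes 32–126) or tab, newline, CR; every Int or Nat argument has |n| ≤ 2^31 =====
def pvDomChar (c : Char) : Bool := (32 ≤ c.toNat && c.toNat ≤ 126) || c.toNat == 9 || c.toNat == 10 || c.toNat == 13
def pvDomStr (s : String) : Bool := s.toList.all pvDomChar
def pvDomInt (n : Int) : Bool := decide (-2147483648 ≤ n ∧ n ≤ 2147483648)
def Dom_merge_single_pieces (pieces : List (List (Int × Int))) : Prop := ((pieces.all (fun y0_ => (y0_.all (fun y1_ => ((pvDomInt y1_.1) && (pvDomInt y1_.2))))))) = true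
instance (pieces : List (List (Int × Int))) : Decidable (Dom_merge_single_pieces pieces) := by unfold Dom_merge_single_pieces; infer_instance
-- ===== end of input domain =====

-- B replaces A's per-single rescans of all pieces by a coord -> first-piece-index
-- dictionary queried at 4 neighbours and updated incrementally (objective: alternative).
-- Like A, the Python B mutates the multi-cell input sets in place; the theorem is about
-- the return value.
-- ===== PORT A =====
-- adjacency test from A's inner if
def mspAdj (c s : Int × Int) : Bool :=
  ((c.1 - s.1).natAbs == 1 && c.2 == s.2) || ((c.2 - s.2).natAbs == 1 && c.1 == s.1)

-- A's inner two loops: scan other_pieces; at the first piece with an adjacent coord,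
-- add the single coord to it (none = not merged)
def mspTry (s : Int × Int) : List (List (Int × Int)) → Option (List (List (Int × Int)))
  | [] => none
  | p :: rest =>
    if p.any (fun c => mspAdj c s) then some (PySem.Set.add p s :: rest)
    else (mspTry s rest).map (p :: ·)

-- A's outer loop body over single_pieces, state = (other_pieces, merged_pieces)
def mspAStep (st : List (List (Int × Int)) × List (List (Int × Int)))
    (sp : List (Int × Int)) : List (List (Int × Int)) × List (List (Int × Int)) :=
  match sp.head? with               -- next(iter(single_piece)); always some: |sp| = 1
  | some c =>
    match mspTry c st.1 with
    | some os => (os, st.2)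
    | none => (st.1, st.2 ++ [sp])
  | none => st

def merge_single_pieces (pieces : List (List (Int × Int))) : List (List (Int × Int)) :=
  let single_pieces := pieces.filter (fun p => p.length == 1)
  let other_pieces := pieces.filter (fun p => decide (p.length > 1))
  let st := single_pieces.foldl mspAStep (other_pieces, [])
  st.1 ++ st.2

-- ===== PORT B =====
def mspNbrs (s : Int × Int) : List (Int × Int) :=
  [(s.1 - 1, s.2), (s.1 + 1, s.2), (s.1, s.2 - 1), (s.1, s.2 + 1)]

-- B's first loop: partition pieces and build the coord -> first-piece-index dictionary
def mspBuild (pieces : List (List (Int × Int))) :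
    List (List (Int × Int)) × List (List (Int × Int)) × PySem.Dict (Int × Int) Nat :=
  pieces.foldl
    (fun st p =>
      if p.length == 1 then (st.1, st.2.1 ++ [p], st.2.2)
      else if decide (p.length > 1) then
        (st.1 ++ [p], st.2.1,
         p.foldl (fun d c => if d.contains c then d else d.insert c st.1.length) st.2.2)
      else st)
    ([], [], PySem.Dict.empty)

-- B's second loop body, state = (others, index, unmerged)
def mspStep (st : List (List (Int × Int)) × PySem.Dict (Int × Int) Nat × List (List (Int × Int)))
    (sp : List (Int × Int)) :
    List (List (Int × Int)) × PySem.Dict (Int × Int) Nat × List (List (Int × Int)) :=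
  match sp.head? with               -- next(iter(s)); always some: |sp| = 1
  | some s =>
    match (mspNbrs s).filterMap (fun nb => st.2.1.get? nb) with
    | [] => (st.1, st.2.1, st.2.2 ++ [sp])
    | c0 :: cs =>
      let i := cs.foldl Nat.min c0                       -- min(cands)
      let os := st.1.set i (PySem.Set.add (st.1.getD i []) s)
      let d :=
        match st.2.1.get? s with
        | none => st.2.1.insert s i
        | some j => if i < j then st.2.1.insert s i else st.2.1
      (os, d, st.2.2)
  | none => st

def merge_single_pieces_alt (pieces : List (List (Int × Int))) : List (List (Int × Int)) :=
  let b := mspBuild pieces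
  let st := b.2.1.foldl mspStep (b.1, b.2.2, [])
  st.1 ++ st.2.2

-- ===== PRECONDITION & SPEC =====
def Spec_merge_single_pieces (pieces : List (List (Int × Int))) (out : List (List (Int × Int))) : Prop := out = merge_single_pieces_alt pieces
instance (pieces : List (List (Int × Int))) (out : List (List (Int × Int))) : Decidable (Spec_merge_single_pieces pieces out) := by unfold Spec_merge_single_pieces; infer_instance

-- ===== CLAIM (what is proved, stated in full; the proofs are below) =====
def Claim_equal_merge_single_pieces : Prop := ∀ (pieces : List (List (Int × Int))), Dom_merge_single_pieces pieces → Spec_merge_single_pieces pieces (merge_single_pieces pieces)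

-- ===== LEMMAS AND PROOFS =====

-- the dictionary invariant: d maps each coord to the index of the first piece containing it
def mspInv (os : List (List (Int × Int))) (d : PySem.Dict (Int × Int) Nat) : Prop :=
  ∀ c : Int × Int, d.get? c = os.findIdx? (fun p => p.contains c)

theorem mspAdj_eq_contains (c s : Int × Int) : mspAdj c s = (mspNbrs s).contains c := by
  obtain ⟨cx, cy⟩ := c; obtain ⟨sx, sy⟩ := s
  rw [Bool.eq_iff_iff]
  simp only [mspAdj, mspNbrs, List.contains_eq_mem, List.mem_cons, List.not_mem_nil, or_false,
    Prod.mk.injEq, Bool.or_eq_true, Bool.and_eq_true, beq_iff_eq, Int.natAbs_eq_iff,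
    decide_eq_true_iff]
  constructor
  · rintro (⟨(h | h), h2⟩ | ⟨(h | h), h2⟩) <;> simp_all <;> omega
  · rintro (⟨h1, h2⟩ | ⟨h1, h2⟩ | ⟨h1, h2⟩ | ⟨h1, h2⟩) <;> [left; left; right; right] <;>
      constructor <;> omega

theorem any_contains_comm (p ns : List (Int × Int)) :
    (p.any fun c => ns.contains c) = (ns.any fun nb => p.contains nb) := by
  rw [Bool.eq_iff_iff]
  simp only [List.any_eq_true, List.contains_eq_mem, decide_eq_true_iff]
  constructor <;> rintro ⟨x, h1, h2⟩ <;> exact ⟨x, h2, h1⟩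

theorem findIdx?_or {α : Type} (a b : α → Bool) (os : List α) :
    os.findIdx? (fun p => a p || b p) =
      match os.findIdx? a, os.findIdx? b with
      | none, y => y
      | x, none => x
      | some i, some j => some (Nat.min i j) := by
  induction os with
  | nil => simp
  | cons p rest ih =>
    simp only [List.findIdx?_cons]
    cases ha : a p <;> cases hb : b p <;> simp [ih] <;>
      rcases rest.findIdx? a with _ | i <;> rcases rest.findIdx? b with _ | j <;>
        simp [Nat.min_def] <;> split <;> omega

theorem foldl_min_min (cs : List Nat) (a b : Nat) :
    cs.foldl Nat.min (Nat.min a b) = Nat.min a (cs.foldl Nat.min b) := by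
  induction cs generalizing b with
  | nil => simp
  | cons c cs ih => simp only [List.foldl_cons, Nat.min_assoc, ih]

theorem findIdx?_any_eq_min (ns : List (Int × Int)) (os : List (List (Int × Int))) :
    os.findIdx? (fun p => ns.any fun nb => p.contains nb) =
      match ns.filterMap (fun nb => os.findIdx? (fun p => p.contains nb)) with
      | [] => none
      | c0 :: cs => some (cs.foldl Nat.min c0) := by
  simp only [List.contains_eq_mem]
  induction ns with
  | nil => simp
  | cons nb rest ih =>
    have h1 : (fun p : List (Int × Int) => (nb :: rest).any fun x => decide (x ∈ p)) =
        (fun p => decide (nb ∈ p) || rest.any fun x => decide (x ∈ p)) := by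
      funext p; simp
    rw [h1, findIdx?_or, List.filterMap_cons]
    cases h : os.findIdx? (fun p => decide (nb ∈ p)) with
    | none => simp [ih]
    | some j =>
      simp only [ih]
      cases h2 : rest.filterMap (fun nb => os.findIdx? (fun p => decide (nb ∈ p))) with
      | nil => simp
      | cons c0 cs => simp [foldl_min_min]

theorem contains_add (p : List (Int × Int)) (s c : Int × Int) :
    (PySem.Set.add p s).contains c = (p.contains c || s == c) := by
  by_cases hm : s ∈ p
  · rw [PySem.Set.add_of_mem hm]
    cases hc : (s == c)
    · simp
    · simp_all [List.contains_eq_mem]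
  · rw [PySem.Set.add_of_not_mem hm]
    cases h : s == c
    · have hne : c ≠ s := by intro he; subst he; simp at h
      simp [List.contains_eq_mem, hne]
    · have he : c = s := (beq_iff_eq.mp h).symm
      subst he
      simp [List.contains_eq_mem]

theorem mspTry_eq (s : Int × Int) (os : List (List (Int × Int))) :
    mspTry s os = (os.findIdx? (fun p => p.any fun c => mspAdj c s)).map
      (fun j => os.set j (PySem.Set.add (os.getD j []) s)) := by
  induction os with
  | nil => simp [mspTry]
  | cons p rest ih =>
    rw [mspTry, List.findIdx?_cons]
    split
    · simp_all
    · rw [ih, Option.map_map, Option.map_map]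
      cases hf : rest.findIdx? (fun p => p.any fun c => mspAdj c s) <;>
        simp [List.getD]

theorem findIdx?_set_same {α : Type} (q : α → Bool) (os : List α) (i : Nat) (v : α)
    (h : ∀ w, os[i]? = some w → q v = q w) :
    (os.set i v).findIdx? q = os.findIdx? q := by
  induction os generalizing i with
  | nil => simp
  | cons p rest ih =>
    cases i with
    | zero =>
      have := h p (by simp)
      simp [List.findIdx?_cons, this]
    | succ i =>
      simp only [List.set_cons_succ, List.findIdx?_cons]
      rw [ih i (fun w hw => h w (by simpa using hw))]

theorem findIdx?_set_true {α : Type} (q : α → Bool) (os : List α) (i : Nat) (v : α)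
    (hi : i < os.length) (hv : q v = true) :
    (os.set i v).findIdx? q =
      match os.findIdx? q with
      | none => some i
      | some j => some (Nat.min i j) := by
  induction os generalizing i with
  | nil => simp at hi
  | cons p rest ih =>
    cases i with
    | zero =>
      have hl : List.findIdx? q (v :: rest) = some 0 := by simp [List.findIdx?_cons, hv]
      rw [List.set_cons_zero, hl]
      cases h : List.findIdx? q (p :: rest) with
      | none => rfl
      | some j => simp [Nat.min_def]
    | succ i =>
      simp only [List.set_cons_succ, List.findIdx?_cons]
      cases hp : q p
      · rw [if_neg (by simp [hp]), ih i (by simpa using hi)]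
        cases hh : rest.findIdx? q <;> simp [hh, Nat.min_def] <;> split <;> omega
      · simp

theorem msp_inner_get (cs : List (Int × Int)) (n : Nat) :
    ∀ (d : PySem.Dict (Int × Int) Nat) (c : Int × Int),
    ((cs.foldl (fun d c => if d.contains c then d else d.insert c n) d).get? c) =
      match d.get? c with
      | some j => some j
      | none => if cs.contains c then some n else none := by
  induction cs with
  | nil => intro d c; cases hg : d.get? c <;> simp [hg]
  | cons c0 rest ih =>
    intro d c
    rw [List.foldl_cons]
    by_cases h0 : d.contains c0
    · rw [if_pos h0, ih]
      cases hg : d.get? c with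
      | some j => rfl
      | none =>
        have hne : c ≠ c0 := by
          intro he; subst he
          rw [PySem.Dict.contains_eq_isSome_get?, hg] at h0; simp at h0
        simp [List.contains_eq_mem, hne]
    · rw [if_neg h0, ih]
      have hg0 : d.get? c0 = none := by
        rw [PySem.Dict.contains_eq_isSome_get?] at h0
        cases hg : d.get? c0 <;> simp [hg] at h0 ⊢
      by_cases he : c = c0
      · subst he
        rw [PySem.Dict.get?_insert_self, hg0]
        simp [List.contains_eq_mem]
      · rw [PySem.Dict.get?_insert_of_ne (hne := he)]
        cases hg : d.get? c with
        | some j => rfl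
        | none => simp [List.contains_eq_mem, he]

theorem mspBuild_go (pieces : List (List (Int × Int))) :
    ∀ (os ss : List (List (Int × Int))) (d : PySem.Dict (Int × Int) Nat), mspInv os d →
    (pieces.foldl
      (fun st p =>
        if p.length == 1 then (st.1, st.2.1 ++ [p], st.2.2)
        else if decide (p.length > 1) then
          (st.1 ++ [p], st.2.1,
           p.foldl (fun d c => if d.contains c then d else d.insert c st.1.length) st.2.2)
        else st)
      (os, ss, d)) =
      ((os ++ pieces.filter (fun p => decide (p.length > 1)),
        ss ++ pieces.filter (fun p => p.length == 1),
        (pieces.foldl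
          (fun st p =>
            if p.length == 1 then (st.1, st.2.1 ++ [p], st.2.2)
            else if decide (p.length > 1) then
              (st.1 ++ [p], st.2.1,
               p.foldl (fun d c => if d.contains c then d else d.insert c st.1.length) st.2.2)
            else st)
          (os, ss, d)).2.2)) ∧
    mspInv (os ++ pieces.filter (fun p => decide (p.length > 1)))
      (pieces.foldl
          (fun st p =>
            if p.length == 1 then (st.1, st.2.1 ++ [p], st.2.2)
            else if decide (p.length > 1) then
              (st.1 ++ [p], st.2.1,
               p.foldl (fun d c => if d.contains c then d else d.insert c st.1.length) st.2.2)
            else st)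
          (os, ss, d)).2.2 := by
  induction pieces with
  | nil => intro os ss d h; simpa using h
  | cons p rest ih =>
    intro os ss d h
    rw [List.foldl_cons, List.filter_cons, List.filter_cons]
    by_cases h1 : p.length = 1
    · simp only [h1, if_pos]
      have : (decide (1 > 1)) = false := by decide
      simp only [beq_self_eq_true, if_true, h1, this, Bool.false_eq_true, if_false]
      have := ih os (ss ++ [p]) d h
      simpa [List.append_assoc] using this
    · by_cases h2 : p.length > 1
      · have hb1 : (p.length == 1) = false := by simp [h1]
        have hb2 : decide (p.length > 1) = true := by simp [h2]
        simp only [hb1, Bool.false_eq_true, if_false, hb2, if_true]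
        have hinv' : mspInv (os ++ [p])
            (p.foldl (fun d c => if d.contains c then d else d.insert c os.length) d) := by
          intro c
          rw [msp_inner_get, List.findIdx?_append, h c]
          cases hf : os.findIdx? (fun p => p.contains c) with
          | some j => rfl
          | none =>
            simp only [Option.or]
            cases hc : (p.contains c) <;>
              simp only [List.contains_eq_mem, decide_eq_true_eq, decide_eq_false_iff_not] at hc <;>
              simp [List.findIdx?_cons, List.contains_eq_mem, hc]
        have := ih (os ++ [p]) ss _ hinv'
        simpa [List.append_assoc] using this
      · have hb1 : (p.length == 1) = false := by simp [h1]
        have hb2 : decide (p.length > 1) = false := by simp [h2]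
        simp only [hb1, Bool.false_eq_true, if_false, hb2]
        exact ih os ss d h

theorem mspStep_eq (sp : List (Int × Int)) (os mer : List (List (Int × Int)))
    (d : PySem.Dict (Int × Int) Nat) (hinv : mspInv os d) :
    (mspStep (os, d, mer) sp).1 = (mspAStep (os, mer) sp).1 ∧
    (mspStep (os, d, mer) sp).2.2 = (mspAStep (os, mer) sp).2 ∧
    mspInv (mspStep (os, d, mer) sp).1 (mspStep (os, d, mer) sp).2.1 := by
  cases hh : sp.head? with
  | none => simp [mspStep, mspAStep, hh, hinv]
  | some s =>
    have hfind : os.findIdx? (fun p => p.any fun c => mspAdj c s) =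
        match (mspNbrs s).filterMap (fun nb => d.get? nb) with
        | [] => none
        | c0 :: cs => some (cs.foldl Nat.min c0) := by
      have e1 : (fun p : List (Int × Int) => p.any fun c => mspAdj c s) =
          (fun p => (mspNbrs s).any fun nb => p.contains nb) := by
        funext p
        rw [show (fun c => mspAdj c s) = (fun c => (mspNbrs s).contains c) from
          funext (fun c => mspAdj_eq_contains c s)]
        exact any_contains_comm p (mspNbrs s)
      have e2 : (fun nb => d.get? nb) =
          (fun nb => os.findIdx? (fun p => p.contains nb)) := funext hinv
      rw [e1, findIdx?_any_eq_min, e2]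
    cases hc : (mspNbrs s).filterMap (fun nb => d.get? nb) with
    | nil =>
      have htry : mspTry s os = none := by rw [mspTry_eq, hfind, hc]; rfl
      simp [mspStep, mspAStep, hh, hc, htry, hinv]
    | cons c0 cs =>
      have hidx : os.findIdx? (fun p => p.any fun c => mspAdj c s) =
          some (cs.foldl Nat.min c0) := by rw [hfind, hc]
      have hlt : cs.foldl Nat.min c0 < os.length := by
        rcases (List.findIdx?_eq_some_iff_findIdx_eq).mp hidx with ⟨h1, _⟩
        exact h1
      have htry : mspTry s os = some (os.set (cs.foldl Nat.min c0)
          (PySem.Set.add (os.getD (cs.foldl Nat.min c0) []) s)) := by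
        rw [mspTry_eq, hidx]; simp
      refine ⟨?_, ?_, ?_⟩
      · simp [mspStep, mspAStep, hh, hc, htry]
      · simp [mspStep, mspAStep, hh, hc, htry]
      · intro c
        set i := cs.foldl Nat.min c0 with hi
        have hB : (mspStep (os, d, mer) sp) =
            (os.set i (PySem.Set.add (os.getD i []) s),
             (match d.get? s with
              | none => d.insert s i
              | some j => if i < j then d.insert s i else d), mer) := by
          simp only [mspStep, hh, hc]
          rfl
        rw [hB]
        by_cases hcs : c = s
        · subst hcs
          have hq : (PySem.Set.add (os.getD i []) c).contains c = true := by
            rw [contains_add]; simp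
          rw [findIdx?_set_true _ _ _ _ hlt hq, ← hinv c]
          cases hg : d.get? c with
          | none => exact PySem.Dict.get?_insert_self _ _ _
          | some j =>
            show (if i < j then d.insert c i else d).get? c = some (i.min j)
            rcases Nat.lt_or_ge i j with hij | hij
            · rw [if_pos hij, PySem.Dict.get?_insert_self]
              exact congrArg some (Nat.min_eq_left (Nat.le_of_lt hij)).symm
            · rw [if_neg (by omega), hg]
              exact congrArg some (Nat.min_eq_right hij).symm
        · have hsame : (os.set i (PySem.Set.add (os.getD i []) s)).findIdx?
              (fun p => p.contains c) = os.findIdx? (fun p => p.contains c) := by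
            apply findIdx?_set_same
            intro w hw
            have hgw : os.getD i [] = w := by simp [List.getD, hw]
            have hbe : (s == c) = false := by
              simp only [beq_eq_false_iff_ne, ne_eq]
              exact fun he => hcs he.symm
            show (PySem.Set.add (os.getD i []) s).contains c = w.contains c
            rw [contains_add, hbe, Bool.or_false, hgw]
          rw [hsame, ← hinv c]
          cases hg : d.get? s with
          | none => exact PySem.Dict.get?_insert_of_ne d i hcs
          | some j =>
            show (if i < j then d.insert s i else d).get? c = d.get? c
            by_cases hij : i < j
            · rw [if_pos hij, PySem.Dict.get?_insert_of_ne (hne := hcs)]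
            · rw [if_neg hij]

theorem msp_fold (singles : List (List (Int × Int))) :
    ∀ (os mer : List (List (Int × Int))) (d : PySem.Dict (Int × Int) Nat), mspInv os d →
    (singles.foldl mspStep (os, d, mer)).1 = (singles.foldl mspAStep (os, mer)).1 ∧
    (singles.foldl mspStep (os, d, mer)).2.2 = (singles.foldl mspAStep (os, mer)).2 := by
  induction singles with
  | nil => intro os mer d h; exact ⟨rfl, rfl⟩
  | cons sp rest ih =>
    intro os mer d h
    rw [List.foldl_cons, List.foldl_cons]
    obtain ⟨h1, h2, h3⟩ := mspStep_eq sp os mer d h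
    have hb : mspStep (os, d, mer) sp =
        ((mspStep (os, d, mer) sp).1, (mspStep (os, d, mer) sp).2.1,
          (mspStep (os, d, mer) sp).2.2) := rfl
    rw [hb, h1, h2]
    rw [h1] at h3
    have ha : mspAStep (os, mer) sp = ((mspAStep (os, mer) sp).1, (mspAStep (os, mer) sp).2) := rfl
    rw [ha]
    exact ih _ _ _ h3

theorem msp_final (pieces : List (List (Int × Int))) :
    merge_single_pieces pieces = merge_single_pieces_alt pieces := by
  obtain ⟨hb, hinv⟩ := mspBuild_go pieces [] [] PySem.Dict.empty
    (fun c => by simp [PySem.Dict.get?_empty])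
  simp only [List.nil_append] at hb hinv
  have hb' : mspBuild pieces =
      (pieces.filter (fun p => decide (p.length > 1)),
       pieces.filter (fun p => p.length == 1),
       (mspBuild pieces).2.2) := hb
  have c1 : (mspBuild pieces).1 = pieces.filter (fun p => decide (p.length > 1)) := by rw [hb']
  have c2 : (mspBuild pieces).2.1 = pieces.filter (fun p => p.length == 1) := by rw [hb']
  obtain ⟨e1, e2⟩ := msp_fold (pieces.filter (fun p => p.length == 1))
      (pieces.filter (fun p => decide (p.length > 1))) [] (mspBuild pieces).2.2 hinv
  have hA : merge_single_pieces pieces =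
      ((pieces.filter (fun p => p.length == 1)).foldl mspAStep
        (pieces.filter (fun p => decide (p.length > 1)), [])).1 ++
      ((pieces.filter (fun p => p.length == 1)).foldl mspAStep
        (pieces.filter (fun p => decide (p.length > 1)), [])).2 := rfl
  have hB : merge_single_pieces_alt pieces =
      ((mspBuild pieces).2.1.foldl mspStep ((mspBuild pieces).1, (mspBuild pieces).2.2, [])).1 ++
      ((mspBuild pieces).2.1.foldl mspStep ((mspBuild pieces).1, (mspBuild pieces).2.2, [])).2.2 := rfl
  rw [hA, hB, c2, c1, e1, e2]

-- ===== VERDICT (by name: the statement is the Claim_ definition above) =====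
theorem merge_single_pieces_spec : Claim_equal_merge_single_pieces := by
  intro pieces _
  exact msp_final pieces
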